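-- pv_equiv track=rewrite | github.com/MohammadMasir/Event-Managment-Application | search.py | optimize_files
-- ===== SOURCE A (Python) =====
-- def optimize_files(files):
--     files.sort()
--     count = 0
--     while len(files)>1:
--         a = files[0]+files[1]
--         count = count+a
--         files[0] = a
--         files.pop(1)
--     return count
-- ===== SOURCE B (Python) =====
-- def optimize_files(files):
--     s = sorted(files)
--     count = 0
--     prefix = s[0] if s else 0
--     for x in s[1:]:
--         prefix += x
--         count += prefix
--     return count
-- ===== Notes on version B (the rewrite author's own statement) =====
-- stated objective: faster
-- what changed: Replaces the quadratic while-loop that repeatedly rewrites and pops the front of the list with a single linear pass over the sorted list accumulating a running prefix sum; B also does not mutate the caller's list (A sorts and empties it in place).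
import Mathlib
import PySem

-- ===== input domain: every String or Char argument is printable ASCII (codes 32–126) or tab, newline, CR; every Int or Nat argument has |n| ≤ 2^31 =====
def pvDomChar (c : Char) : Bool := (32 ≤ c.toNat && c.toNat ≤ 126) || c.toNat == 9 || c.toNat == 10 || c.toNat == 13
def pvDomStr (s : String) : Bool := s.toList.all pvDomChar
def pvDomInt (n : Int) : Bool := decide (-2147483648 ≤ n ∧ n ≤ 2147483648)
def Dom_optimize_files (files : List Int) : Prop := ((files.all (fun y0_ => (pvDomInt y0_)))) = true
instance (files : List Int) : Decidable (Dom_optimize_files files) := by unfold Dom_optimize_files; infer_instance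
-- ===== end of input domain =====

-- B replaces A's quadratic pop-the-front merging loop with one linear prefix-sum pass
-- over the sorted list (objective: faster). Equivalence is about the RETURN value only:
-- Python A mutates its argument in place (sorts it and pops it down to one element); B does not.


-- ===== PORT A =====
-- the while loop: state is the (mutated) list and the running count
def optFilesLoop : List Int → Int → Int
  | a :: b :: rest, count => optFilesLoop ((a + b) :: rest) (count + (a + b))
  | _, count => count
termination_by l _ => l.length

def optimize_files (files : List Int) : Int :=
  optFilesLoop (PySem.List.sorted files (fun x => x) false) 0

-- ===== PORT B =====
def optimize_files_alt (files : List Int) : Int :=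
  match PySem.List.sorted files (fun x => x) false with
  | [] => 0
  | h :: t =>
      (t.foldl (fun (pc : Int × Int) x => (pc.1 + x, pc.2 + (pc.1 + x))) (h, 0)).2

-- ===== PRECONDITION & SPEC =====
def Spec_optimize_files (files : List Int) (out : Int) : Prop := out = optimize_files_alt files
instance (files : List Int) (out : Int) : Decidable (Spec_optimize_files files out) := by unfold Spec_optimize_files; infer_instance

-- ===== CLAIM (what is proved, stated in full; the proofs are below) =====
def Claim_equal_optimize_files : Prop := ∀ (files : List Int), Dom_optimize_files files → Spec_optimize_files files (optimize_files files)

-- ===== LEMMAS AND PROOFS =====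

-- shifting the count accumulator of B's fold out of the fold
theorem foldB_shift (t : List Int) (p c d : Int) :
    (t.foldl (fun (pc : Int × Int) x => (pc.1 + x, pc.2 + (pc.1 + x))) (p, c + d)).2
      = d + (t.foldl (fun (pc : Int × Int) x => (pc.1 + x, pc.2 + (pc.1 + x))) (p, c)).2 := by
  induction t generalizing p c with
  | nil => simp [List.foldl]; ring
  | cons x xs ih =>
      simp only [List.foldl]
      have : c + d + (p + x) = (c + (p + x)) + d := by ring
      rw [this, ih]

-- A's loop on h :: t equals the starting count plus B's fold over t
theorem loopA_eq_foldB (t : List Int) (h c : Int) :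
    optFilesLoop (h :: t) c
      = c + (t.foldl (fun (pc : Int × Int) x => (pc.1 + x, pc.2 + (pc.1 + x))) (h, 0)).2 := by
  induction t generalizing h c with
  | nil => simp [optFilesLoop, List.foldl]
  | cons b rest ih =>
      simp only [optFilesLoop, List.foldl]
      rw [ih, foldB_shift rest (h + b) 0 (h + b)]
      ring

-- ===== VERDICT (by name: the statement is the Claim_ definition above) =====
theorem optimize_files_spec : Claim_equal_optimize_files := by
  intro files _
  unfold Spec_optimize_files optimize_files optimize_files_alt
  cases hs : PySem.List.sorted files (fun x => x) false with
  | nil => simp [optFilesLoop]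
  | cons h t => rw [loopA_eq_foldB]; ring
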